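-- pv_equiv track=rewrite | github.com/visdesignlab/Sanguine | backend/api/views/utils/cpt_hierarchy.py | _normalize_cpt_code
-- ===== SOURCE A (Python) =====
-- def _normalize_cpt_code(raw_code: str | None) -> str | None:
--     if raw_code is None:
--         return None
--     normalized = raw_code.strip().upper()
--     if not normalized:
--         return None
--
--     # Ignore common suffix/modifier formatting from source systems.
--     for delimiter in (' ', '-', '.'):
--         normalized = normalized.split(delimiter, 1)[0]
--
--     if normalized.isdigit():
--         normalized = normalized.zfill(5)
--     return normalized or None
-- ===== SOURCE B (Python) =====
-- def _normalize_cpt_code(raw_code):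
--     if raw_code is None:
--         return None
--     normalized = raw_code.strip().upper()
--     if not normalized:
--         return None
--
--     # Single character scan: keep everything before the first delimiter.
--     chars = []
--     for c in normalized:
--         if c in ' -.':
--             break
--         chars.append(c)
--     code = ''.join(chars)
--
--     if code.isdigit():
--         code = code.zfill(5)
--     return code or None
-- ===== Notes on version B (the rewrite author's own statement) =====
-- stated objective: simpler
-- what changed: Replaces the three sequential split(delimiter,1)[0] passes with a single character scan that stops at the first of the three delimiters.
import Mathlib
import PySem

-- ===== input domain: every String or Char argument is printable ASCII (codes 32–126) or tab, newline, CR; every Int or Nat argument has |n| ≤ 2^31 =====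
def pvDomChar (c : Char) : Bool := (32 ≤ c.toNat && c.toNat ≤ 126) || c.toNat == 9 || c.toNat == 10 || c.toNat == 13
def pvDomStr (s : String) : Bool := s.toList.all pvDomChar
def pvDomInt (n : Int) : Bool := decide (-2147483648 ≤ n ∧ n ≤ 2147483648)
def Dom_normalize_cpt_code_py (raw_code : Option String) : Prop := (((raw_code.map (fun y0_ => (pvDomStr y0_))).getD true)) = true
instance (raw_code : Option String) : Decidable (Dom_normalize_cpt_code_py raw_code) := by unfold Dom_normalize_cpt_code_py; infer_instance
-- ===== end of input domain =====

-- B replaces A's three sequential split-and-keep-head passes by one character scan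
-- that stops at the first delimiter (objective: simpler, one pass over the string).

-- ===== PORT A =====
def normalize_cpt_code_py (raw_code : Option String) : Option String :=
  match raw_code with
  | none => none
  | some rc =>
    let norm0 := PySem.Str.upper (PySem.Str.strip rc)
    if norm0 = "" then none
    else
      -- for delimiter in (' ', '-', '.'): normalized = normalized.split(delimiter, 1)[0]
      -- (split with a nonempty separator never returns none / an empty list,
      --  so the getD/headD defaults are never reached)
      let norm1 := [" ", "-", "."].foldl
        (fun s delim => ((PySem.Str.splitMax? s delim 1).getD []).headD "") norm0
      let norm2 := if PySem.Str.strIsdigit norm1 then PySem.Str.zfill norm1 5 else norm1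
      if norm2 = "" then none else some norm2

-- ===== PORT B =====
-- B's `for c in normalized: if c in ' -.': break; chars.append(c)` loop
def pyTakeUntilDelim : List Char → List Char
  | [] => []
  | c :: rest => if c = ' ' ∨ c = '-' ∨ c = '.' then [] else c :: pyTakeUntilDelim rest

def normalize_cpt_code_py_alt (raw_code : Option String) : Option String :=
  match raw_code with
  | none => none
  | some rc =>
    let s := PySem.Str.upper (PySem.Str.strip rc)
    if s = "" then none
    else
      let code0 := String.ofList (pyTakeUntilDelim s.toList)
      let code := if PySem.Str.strIsdigit code0 then PySem.Str.zfill code0 5 else code0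
      if code = "" then none else some code

-- ===== PRECONDITION & SPEC =====
def Spec_normalize_cpt_code_py (raw_code : Option String) (out : Option String) : Prop := out = normalize_cpt_code_py_alt raw_code
instance (raw_code : Option String) (out : Option String) : Decidable (Spec_normalize_cpt_code_py raw_code out) := by unfold Spec_normalize_cpt_code_py; infer_instance

-- ===== CLAIM (what is proved, stated in full; the proofs are below) =====
def Claim_equal_normalize_cpt_code_py : Prop := ∀ (raw_code : Option String), Dom_normalize_cpt_code_py raw_code → Spec_normalize_cpt_code_py raw_code (normalize_cpt_code_py raw_code)

-- ===== LEMMAS AND PROOFS =====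

theorem go_acc (sep : List Char) : ∀ (fuel m : ℕ) (l cur : List Char) (acc : List (List Char)),
    PySem.Chars.splitOnMax.go sep fuel m l cur acc
      = acc.reverse ++ PySem.Chars.splitOnMax.go sep fuel m l cur [] := by
  intro fuel
  induction fuel with
  | zero => intro m l cur acc; simp [PySem.Chars.splitOnMax.go]
  | succ f ih =>
    intro m l cur acc
    cases l with
    | nil => simp [PySem.Chars.splitOnMax.go]
    | cons c rest =>
      simp only [PySem.Chars.splitOnMax.go]
      split_ifs with hm hp
      · simp
      · rw [ih _ _ _ (cur.reverse :: acc), ih _ _ _ [cur.reverse]]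
        simp
      · exact ih _ _ _ acc

theorem go_head (d : Char) : ∀ (l : List Char) (fuel : ℕ) (cur : List Char), l.length < fuel →
    (PySem.Chars.splitOnMax.go [d] fuel 1 l cur []).head?
      = some (cur.reverse ++ l.takeWhile (fun c => !(c == d))) := by
  intro l
  induction l with
  | nil =>
    intro fuel cur h
    cases fuel with
    | zero => omega
    | succ f => simp [PySem.Chars.splitOnMax.go]
  | cons c rest ih =>
    intro fuel cur h
    cases fuel with
    | zero => omega
    | succ f =>
      simp only [PySem.Chars.splitOnMax.go]
      by_cases hc : c = d
      · subst hc
        rw [if_neg (by norm_num : ¬ (1:ℕ) = 0), if_pos (by simp [List.isPrefixOf])]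
        rw [go_acc]
        simp
      · rw [if_neg (by norm_num : ¬ (1:ℕ) = 0),
            if_neg (by simp [List.isPrefixOf]; exact fun h' => hc h'.symm)]
        rw [ih f (c :: cur) (by simpa using Nat.lt_of_succ_lt_succ h)]
        simp [hc]
  termination_by l => l.length

theorem splitOnMax_head (s : List Char) (d : Char) :
    (PySem.Chars.splitOnMax s [d] 1).head? = some (s.takeWhile (fun c => !(c == d))) := by
  unfold PySem.Chars.splitOnMax
  rw [if_neg (by norm_num)]
  have : ((1 : ℤ)).toNat = 1 := rfl
  rw [this]
  exact go_head d s (s.length + 1) [] (by omega)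

theorem str_step (s : String) (dstr : String) (d : Char) (hd : dstr.toList = [d]) :
    (((PySem.Str.splitMax? s dstr 1).getD []).headD "").toList
      = s.toList.takeWhile (fun c => !(c == d)) := by
  unfold PySem.Str.splitMax? PySem.Chars.splitMax?
  rw [hd, if_neg (by simp)]
  simp only [Option.map_some, Option.getD_some, List.headD_eq_head?_getD, List.head?_map,
    splitOnMax_head, Option.map_some, Option.getD_some, String.toList_ofList]

theorem takeUntil_eq (l : List Char) :
    ((l.takeWhile (fun c => !(c == ' '))).takeWhile (fun c => !(c == '-'))).takeWhile (fun c => !(c == '.'))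
      = pyTakeUntilDelim l := by
  rw [List.takeWhile_takeWhile, List.takeWhile_takeWhile]
  induction l with
  | nil => rfl
  | cons c rest ih =>
    simp only [List.takeWhile_cons, pyTakeUntilDelim]
    by_cases hc : c = ' ' ∨ c = '-' ∨ c = '.'
    · rcases hc with h | h | h <;> subst h <;> simp
    · obtain ⟨h1, h2, h3⟩ : c ≠ ' ' ∧ c ≠ '-' ∧ c ≠ '.' := by
        refine ⟨?_, ?_, ?_⟩ <;> intro h <;> exact hc (by simp [h])
      rw [if_pos (by simp [h1, h2, h3]), if_neg (by simp [h1, h2, h3]), ih]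

theorem chain_eq (s : String) :
    ([" ", "-", "."].foldl
        (fun s delim => ((PySem.Str.splitMax? s delim 1).getD []).headD "") s)
      = String.ofList (pyTakeUntilDelim s.toList) := by
  apply String.toList_inj.mp
  simp only [List.foldl]
  rw [str_step _ "." '.' (by decide), str_step _ "-" '-' (by decide),
      str_step _ " " ' ' (by decide), takeUntil_eq, String.toList_ofList]

-- ===== VERDICT (by name: the statement is the Claim_ definition above) =====
theorem normalize_cpt_code_py_spec : Claim_equal_normalize_cpt_code_py := by
  intro raw_code _
  unfold Spec_normalize_cpt_code_py
  cases raw_code with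
  | none => rfl
  | some rc =>
    simp only [normalize_cpt_code_py, normalize_cpt_code_py_alt]
    rw [chain_eq]
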